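-- pv_equiv track=rewrite | github.com/hbcha0916/fact0rnDashboardServer | lib/UnitFunctions.py | workersDetail_to_StruDetail
-- ===== SOURCE A (Python) =====
-- def workersDetail_to_StruDetail(data):
--     struData = {}
--     for worker_id, worker_id_values in data.items():
--         for workerData, workerDetail in data[worker_id].items():
--             if "Miner Info" in workerData:
--                 if not workerDetail['Farm'] in struData:
--                     struData[workerDetail['Farm']] = {}
--                 if not workerDetail['Group'] in struData:
--                     struData[workerDetail['Farm']][workerDetail['Group']] = []
--
--     for worker_id, worker_id_values in data.items():
--         for workerData, workerDetail in data[worker_id].items():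
--             if "Miner Info" in workerData:
--                 struData[workerDetail['Farm']][workerDetail['Group']].append(workerDetail['Worker'])
--
--     return struData
-- ===== SOURCE B (Python) =====
-- def workersDetail_to_StruDetail(data):
--     triples = [(d['Farm'], d['Group'], d['Worker'])
--                for workers in data.values()
--                for key, d in workers.items()
--                if "Miner Info" in key]
--     struData = {}
--     for farm, group, worker in triples:
--         struData.setdefault(farm, {}).setdefault(group, []).append(worker)
--     return struData
-- ===== Notes on version B (the rewrite author's own statement) =====
-- stated objective: simpler
-- what changed: B replaces A's two full passes over the nested dict (a skeleton-building pass with membership tests against the top-level dict, then an append pass that re-looks every worker entry up via data[worker_id]) by a single flattening comprehension into (farm, group, worker) triples followed by one setdefault-grouping loop.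
import Mathlib
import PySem

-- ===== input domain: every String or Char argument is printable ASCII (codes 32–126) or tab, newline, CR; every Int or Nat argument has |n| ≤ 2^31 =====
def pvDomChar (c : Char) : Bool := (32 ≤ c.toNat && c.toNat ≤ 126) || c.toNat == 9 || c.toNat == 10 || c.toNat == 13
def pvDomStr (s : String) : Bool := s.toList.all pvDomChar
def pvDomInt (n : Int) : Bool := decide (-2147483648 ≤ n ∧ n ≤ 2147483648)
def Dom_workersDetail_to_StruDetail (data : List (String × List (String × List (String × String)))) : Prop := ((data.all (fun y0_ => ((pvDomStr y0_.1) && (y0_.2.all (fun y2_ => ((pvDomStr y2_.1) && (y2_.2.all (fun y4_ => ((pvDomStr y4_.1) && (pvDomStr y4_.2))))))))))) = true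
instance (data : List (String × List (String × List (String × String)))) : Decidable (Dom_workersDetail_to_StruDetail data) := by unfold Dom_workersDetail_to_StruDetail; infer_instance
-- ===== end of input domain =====

-- B replaces A's two passes (skeleton pass with top-level membership tests, then an append pass
-- re-looking entries up) by one flatten-to-(farm,group,worker)-triples step and one grouping loop;
-- objective: simpler.


-- ===== PORT A =====
-- Literal transliteration of A: two passes over data; inner lists fetched by data[worker_id]
-- (first-match lookup); dict lookups workerDetail['Farm' | 'Group' | 'Worker'] would raise
-- KeyError where absent — Pre_ excludes those inputs, so the `.getD` defaults are never reached.
def workersDetail_to_StruDetail (data : List (String × List (String × List (String × String)))) : List (String × List (String × List String)) :=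
  let struData1 : PySem.Dict String (PySem.Dict String (List String)) :=
    data.foldl (fun st p =>
      (((PySem.Dict.mk data).get? p.1).getD []).foldl (fun st q =>
        if PySem.Str.isIn "Miner Info" q.1 then
          let farm := ((PySem.Dict.mk q.2).get? "Farm").getD ""
          let grp  := ((PySem.Dict.mk q.2).get? "Group").getD ""
          let st1 := if st.contains farm then st else st.insert farm PySem.Dict.empty
          if st1.contains grp then st1
          else st1.insert farm (((st1.get? farm).getD PySem.Dict.empty).insert grp [])
        else st) st) PySem.Dict.empty
  let struData2 : PySem.Dict String (PySem.Dict String (List String)) :=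
    data.foldl (fun st p =>
      (((PySem.Dict.mk data).get? p.1).getD []).foldl (fun st q =>
        if PySem.Str.isIn "Miner Info" q.1 then
          let farm := ((PySem.Dict.mk q.2).get? "Farm").getD ""
          let grp  := ((PySem.Dict.mk q.2).get? "Group").getD ""
          let w    := ((PySem.Dict.mk q.2).get? "Worker").getD ""
          let fd   := (st.get? farm).getD PySem.Dict.empty
          st.insert farm (fd.insert grp ((fd.get? grp).getD [] ++ [w]))
        else st) st) struData1
  struData2.items.map (fun p => (p.1, p.2.items))

-- ===== PORT B =====
-- Transliteration of B: flatten to (farm, group, worker) triples, then one setdefault-grouping loop.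
def workersDetail_to_StruDetail_alt (data : List (String × List (String × List (String × String)))) : List (String × List (String × List String)) :=
  let triples : List (String × String × String) :=
    data.flatMap (fun p =>
      (p.2.filter (fun q => PySem.Str.isIn "Miner Info" q.1)).map (fun q =>
        (((PySem.Dict.mk q.2).get? "Farm").getD "",
         ((PySem.Dict.mk q.2).get? "Group").getD "",
         ((PySem.Dict.mk q.2).get? "Worker").getD "")))
  let struData : PySem.Dict String (PySem.Dict String (List String)) :=
    triples.foldl (fun st t =>
      let fd := (st.get? t.1).getD PySem.Dict.empty
      st.insert t.1 (fd.insert t.2.1 ((fd.get? t.2.1).getD [] ++ [t.2.2]))) PySem.Dict.empty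
  struData.items.map (fun p => (p.1, p.2.items))

-- ===== PRECONDITION & SPEC =====
-- the 'Miner Info' detail dicts of the input, in order (input-shape helper for Pre_)
def pvMinerDetails (data : List (String × List (String × List (String × String)))) : List (List (String × String)) :=
  data.flatMap (fun p => (p.2.filter (fun q => PySem.Str.isIn "Miner Info" q.1)).map (fun q => q.2))

-- Pre_ excludes (a) duplicate top-level keys (impossible for a Python dict argument), (b) miner
-- detail dicts missing a 'Farm'/'Group'/'Worker' key (A raises KeyError), and (c) inputs where some
-- miner's group name equals some miner's farm name: there A's create-inner-list test against the
-- TOP-LEVEL dict usually makes pass 2 raise KeyError, and where A still returns, its value is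
-- accidental (B returns the same nested grouping there).
def Pre_workersDetail_to_StruDetail (data : List (String × List (String × List (String × String)))) : Prop :=
  (data.map Prod.fst).Nodup ∧
  (∀ d ∈ pvMinerDetails data,
    (PySem.Dict.mk d).contains "Farm" = true ∧ (PySem.Dict.mk d).contains "Group" = true ∧
    (PySem.Dict.mk d).contains "Worker" = true) ∧
  (∀ d ∈ pvMinerDetails data, ∀ d' ∈ pvMinerDetails data,
    ((PySem.Dict.mk d).get? "Group").getD "" ≠ ((PySem.Dict.mk d').get? "Farm").getD "")
instance (data : List (String × List (String × List (String × String)))) : Decidable (Pre_workersDetail_to_StruDetail data) := by unfold Pre_workersDetail_to_StruDetail; infer_instance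

def pvWitness_workersDetail_to_StruDetail : (List (String × List (String × List (String × String)))) :=
  [("w1", [("Miner Info", [("Farm", "F"), ("Group", "G"), ("Worker", "x")])])]

def Spec_workersDetail_to_StruDetail (data : List (String × List (String × List (String × String)))) (out : List (String × List (String × List String))) : Prop := out = workersDetail_to_StruDetail_alt data
instance (data : List (String × List (String × List (String × String)))) (out : List (String × List (String × List String))) : Decidable (Spec_workersDetail_to_StruDetail data out) := by unfold Spec_workersDetail_to_StruDetail; infer_instance

-- ===== CLAIM (what is proved, stated in full; the proofs are below) =====
def Claim_equal_workersDetail_to_StruDetail : Prop := ∀ (data : List (String × List (String × List (String × String)))), Dom_workersDetail_to_StruDetail data → Pre_workersDetail_to_StruDetail data → Spec_workersDetail_to_StruDetail data (workersDetail_to_StruDetail data)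

-- ===== LEMMAS AND PROOFS =====

-- the two loop bodies of A and the loop body of B, over a flattened triple (farm, group, worker)
def pvStep1 (st : PySem.Dict String (PySem.Dict String (List String))) (t : String × String × String) :
    PySem.Dict String (PySem.Dict String (List String)) :=
  let st1 := if st.contains t.1 then st else st.insert t.1 PySem.Dict.empty
  if st1.contains t.2.1 then st1
  else st1.insert t.1 (((st1.get? t.1).getD PySem.Dict.empty).insert t.2.1 [])

def pvStep2 (st : PySem.Dict String (PySem.Dict String (List String))) (t : String × String × String) :
    PySem.Dict String (PySem.Dict String (List String)) :=
  let fd := (st.get? t.1).getD PySem.Dict.empty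
  st.insert t.1 (fd.insert t.2.1 ((fd.get? t.2.1).getD [] ++ [t.2.2]))

def pvTri (data : List (String × List (String × List (String × String)))) : List (String × String × String) :=
  data.flatMap (fun p =>
    (p.2.filter (fun q => PySem.Str.isIn "Miner Info" q.1)).map (fun q =>
      (((PySem.Dict.mk q.2).get? "Farm").getD "",
       ((PySem.Dict.mk q.2).get? "Group").getD "",
       ((PySem.Dict.mk q.2).get? "Worker").getD "")))

def pvFarms (ts : List (String × String × String)) : List String :=
  PySem.Set.ofList (ts.map (fun t => t.1))
def pvGrps (ts : List (String × String × String)) (f : String) : List String :=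
  PySem.Set.ofList ((ts.filter (fun t => t.1 == f)).map (fun t => t.2.1))
def pvWks (ts : List (String × String × String)) (f g : String) : List String :=
  (ts.filter (fun t => t.1 == f && t.2.1 == g)).map (fun t => t.2.2)

def pvInner (ts : List (String × String × String)) (f : String) : PySem.Dict String (List String) :=
  PySem.Dict.mk ((pvGrps ts f).map (fun g => (g, pvWks ts f g)))
def pvSkelInner (ts : List (String × String × String)) (f : String) : PySem.Dict String (List String) :=
  PySem.Dict.mk ((pvGrps ts f).map (fun g => (g, ([] : List String))))
def pvCanon (ts : List (String × String × String)) : PySem.Dict String (PySem.Dict String (List String)) :=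
  PySem.Dict.mk ((pvFarms ts).map (fun f => (f, pvInner ts f)))
def pvSkel (ts : List (String × String × String)) : PySem.Dict String (PySem.Dict String (List String)) :=
  PySem.Dict.mk ((pvFarms ts).map (fun f => (f, pvSkelInner ts f)))

theorem pv_keys_mk_map {β : Type} (ks : List String) (F : String → β) :
    (PySem.Dict.mk (ks.map (fun k => (k, F k)))).keys = ks := by
  simp [PySem.Dict.keys, List.map_map, Function.comp_def]

theorem pv_get?_mk_map {β : Type} (ks : List String) (F : String → β) (hnd : ks.Nodup) (x : String) :
    (PySem.Dict.mk (ks.map (fun k => (k, F k)))).get? x = if x ∈ ks then some (F x) else none := by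
  induction ks with
  | nil => simp [PySem.Dict.get?]
  | cons k ks ih =>
    rw [List.map_cons, PySem.Dict.get?_mk_cons]
    rcases List.nodup_cons.mp hnd with ⟨hk, hnd'⟩
    by_cases hxk : k = x
    · subst hxk; simp
    · simp only [beq_iff_eq, if_neg hxk, ih hnd', List.mem_cons]
      by_cases hx : x ∈ ks
      · simp [hx, Ne.symm hxk]
      · simp [hx, Ne.symm hxk]

theorem pv_insert_mk_map {β : Type} (ks : List String) (F : String → β) (k : String) (hk : k ∈ ks) (v : β) :
    (PySem.Dict.mk (ks.map (fun j => (j, F j)))).insert k v =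
      PySem.Dict.mk (ks.map (fun j => (j, if j = k then v else F j))) := by
  have hc : (PySem.Dict.mk (ks.map (fun j => (j, F j)))).contains k = true := by
    rw [PySem.Dict.contains_iff_mem_keys, pv_keys_mk_map]; exact hk
  apply PySem.Dict.ext
  rw [PySem.Dict.items_insert_of_contains _ _ hc]
  show (ks.map _).map _ = _
  rw [List.map_map]
  refine List.map_congr_left (fun j _ => ?_)
  by_cases hj : j = k
  · subst hj; simp
  · simp [hj]

theorem pv_insert_mk_map_not_mem {β : Type} (ks : List String) (F : String → β) (k : String) (hk : k ∉ ks) (v : β) :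
    (PySem.Dict.mk (ks.map (fun j => (j, F j)))).insert k v =
      PySem.Dict.mk (ks.map (fun j => (j, F j)) ++ [(k, v)]) := by
  have hc : (PySem.Dict.mk (ks.map (fun j => (j, F j)))).contains k = false := by
    rw [← Bool.not_eq_true, PySem.Dict.contains_iff_mem_keys, pv_keys_mk_map]; exact hk
  apply PySem.Dict.ext
  rw [PySem.Dict.items_insert_of_not_contains _ _ hc]

theorem pv_grps_nil_of_not_farm (ts : List (String × String × String)) (f : String)
    (hf : f ∉ pvFarms ts) : ts.filter (fun t => t.1 == f) = [] := by
  rw [List.filter_eq_nil_iff]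
  intro t ht hbeq
  exact hf (by
    rw [pvFarms, PySem.Set.mem_ofList]
    exact List.mem_map.mpr ⟨t, ht, (beq_iff_eq.mp hbeq)⟩)

theorem pv_wks_nil_of_not_grp (ts : List (String × String × String)) (f g : String)
    (hg : g ∉ pvGrps ts f) : pvWks ts f g = [] := by
  rw [pvWks, List.map_eq_nil_iff, List.filter_eq_nil_iff]
  intro t ht hbeq
  rcases Bool.and_eq_true_iff.mp hbeq with ⟨h1, h2⟩
  exact hg (by
    rw [pvGrps, PySem.Set.mem_ofList]
    exact List.mem_map.mpr ⟨t, List.mem_filter.mpr ⟨ht, h1⟩, beq_iff_eq.mp h2⟩)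

theorem pv_farms_append (ts : List (String × String × String)) (t : String × String × String) :
    pvFarms (ts ++ [t]) = PySem.Set.add (pvFarms ts) t.1 := by
  rw [pvFarms, pvFarms, List.map_append, List.map_cons, List.map_nil, PySem.Set.ofList_append_singleton]

theorem pv_grps_append_self (ts : List (String × String × String)) (t : String × String × String) :
    pvGrps (ts ++ [t]) t.1 = PySem.Set.add (pvGrps ts t.1) t.2.1 := by
  rw [pvGrps, pvGrps, List.filter_append]
  simp [PySem.Set.ofList_append_singleton]

theorem pv_grps_append_ne (ts : List (String × String × String)) (t : String × String × String)
    (f : String) (hf : f ≠ t.1) : pvGrps (ts ++ [t]) f = pvGrps ts f := by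
  rw [pvGrps, pvGrps, List.filter_append]
  have : List.filter (fun s => s.1 == f) [t] = [] := by simp [Ne.symm hf]
  rw [this, List.append_nil]

theorem pv_wks_append_self (ts : List (String × String × String)) (t : String × String × String) :
    pvWks (ts ++ [t]) t.1 t.2.1 = pvWks ts t.1 t.2.1 ++ [t.2.2] := by
  rw [pvWks, pvWks, List.filter_append]
  simp

theorem pv_wks_append_ne (ts : List (String × String × String)) (t : String × String × String)
    (f g : String) (h : ¬(f = t.1 ∧ g = t.2.1)) : pvWks (ts ++ [t]) f g = pvWks ts f g := by
  rw [pvWks, pvWks, List.filter_append]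
  have : List.filter (fun s => s.1 == f && s.2.1 == g) [t] = [] := by
    simp only [List.filter_cons, List.filter_nil]
    split
    · next hcond =>
      rcases Bool.and_eq_true_iff.mp hcond with ⟨h1, h2⟩
      exact absurd ⟨(beq_iff_eq.mp h1).symm, (beq_iff_eq.mp h2).symm⟩ h
    · rfl
  rw [this, List.append_nil]

theorem pv_nodup_farms (ts : List (String × String × String)) : (pvFarms ts).Nodup :=
  PySem.Set.nodup_ofList _
theorem pv_nodup_grps (ts : List (String × String × String)) (f : String) : (pvGrps ts f).Nodup :=
  PySem.Set.nodup_ofList _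

theorem pv_mem_farms {ts : List (String × String × String)} {t : String × String × String}
    (ht : t ∈ ts) : t.1 ∈ pvFarms ts := by
  rw [pvFarms, PySem.Set.mem_ofList]
  exact List.mem_map.mpr ⟨t, ht, rfl⟩

theorem pv_mem_grps {ts : List (String × String × String)} {t : String × String × String}
    (ht : t ∈ ts) : t.2.1 ∈ pvGrps ts t.1 := by
  rw [pvGrps, PySem.Set.mem_ofList]
  exact List.mem_map.mpr ⟨t, List.mem_filter.mpr ⟨ht, beq_self_eq_true _⟩, rfl⟩

theorem pv_inner_append_ne (ts : List (String × String × String)) (t : String × String × String)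
    (i : String) (hi : i ≠ t.1) : pvInner (ts ++ [t]) i = pvInner ts i := by
  rw [pvInner, pvInner, pv_grps_append_ne ts t i hi]
  congr 1
  refine List.map_congr_left (fun j _ => ?_)
  rw [pv_wks_append_ne ts t i j (fun hc => hi hc.1)]

theorem pv_inner_append_self_mem (ts : List (String × String × String))
    (t : String × String × String) (hg : t.2.1 ∈ pvGrps ts t.1) :
    pvInner (ts ++ [t]) t.1 =
      PySem.Dict.mk ((pvGrps ts t.1).map (fun j =>
        (j, if j = t.2.1 then pvWks ts t.1 t.2.1 ++ [t.2.2] else pvWks ts t.1 j))) := by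
  rw [pvInner, pv_grps_append_self, PySem.Set.add_of_mem hg]
  refine congrArg PySem.Dict.mk (List.map_congr_left (fun j _ => ?_))
  by_cases hj : j = t.2.1
  · subst hj; rw [pv_wks_append_self, if_pos rfl]
  · rw [pv_wks_append_ne ts t t.1 j (fun hc => hj hc.2), if_neg hj]

theorem pv_step2_canon (ts : List (String × String × String)) (t : String × String × String) :
    pvStep2 (pvCanon ts) t = pvCanon (ts ++ [t]) := by
  obtain ⟨f, g, w⟩ := t
  simp only [pvStep2, pvCanon]
  rw [pv_get?_mk_map (pvFarms ts) (pvInner ts) (pv_nodup_farms ts) f]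
  by_cases hf : f ∈ pvFarms ts
  · rw [if_pos hf]
    simp only [Option.getD_some]
    rw [pvInner, pv_get?_mk_map (pvGrps ts f) (pvWks ts f) (pv_nodup_grps ts f) g]
    rw [pv_farms_append, PySem.Set.add_of_mem (s := pvFarms ts) hf]
    by_cases hg : g ∈ pvGrps ts f
    · rw [if_pos hg]
      simp only [Option.getD_some]
      rw [pv_insert_mk_map (pvGrps ts f) (pvWks ts f) g hg _]
      rw [pv_insert_mk_map (pvFarms ts) (pvInner ts) f hf _]
      refine congrArg PySem.Dict.mk (List.map_congr_left (fun i hi => ?_))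
      by_cases hif : i = f
      · subst hif
        rw [if_pos rfl, pv_inner_append_self_mem ts (i, g, w) hg]
      · rw [if_neg hif, pv_inner_append_ne ts (f, g, w) i hif]
    · rw [if_neg hg]
      simp only [Option.getD_none, List.nil_append]
      rw [pv_insert_mk_map_not_mem (pvGrps ts f) (pvWks ts f) g hg _]
      rw [pv_insert_mk_map (pvFarms ts) (pvInner ts) f hf _]
      refine congrArg PySem.Dict.mk (List.map_congr_left (fun i hi => ?_))
      by_cases hif : i = f
      · subst hif
        rw [if_pos rfl, pvInner, pv_grps_append_self,
            PySem.Set.add_of_not_mem (s := pvGrps ts i) hg, List.map_append]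
        congr 1
        congr 1
        refine congrArg₂ (· ++ ·) (List.map_congr_left (fun j hj => ?_)) ?_
        · rw [pv_wks_append_ne ts (i, g, w) i j (fun hc => hg ((show j = g from hc.2) ▸ hj))]
        · rw [List.map_cons, List.map_nil, pv_wks_append_self,
              pv_wks_nil_of_not_grp ts i g hg, List.nil_append]
      · rw [if_neg hif, pv_inner_append_ne ts (f, g, w) i hif]
  · rw [if_neg hf]
    simp only [Option.getD_none, PySem.Dict.get?_empty, List.nil_append]
    rw [pv_farms_append, PySem.Set.add_of_not_mem (s := pvFarms ts) hf]
    have he : (PySem.Dict.empty : PySem.Dict String (List String)).insert g [w] =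
        PySem.Dict.mk [(g, [w])] := rfl
    rw [he, pv_insert_mk_map_not_mem (pvFarms ts) (pvInner ts) f hf _, List.map_append]
    refine congrArg PySem.Dict.mk ?_
    refine congrArg₂ _ (List.map_congr_left (fun i hi => ?_)) ?_
    · rw [pv_inner_append_ne ts (f, g, w) i
            (fun hif => hf (show f ∈ pvFarms ts from (show i = f from hif) ▸ hi))]
    · rw [List.map_cons, List.map_nil]
      have hgr : pvGrps ts f = [] := by
        rw [pvGrps, pv_grps_nil_of_not_farm ts f hf]; rfl
      have hwk : pvWks ts f g = [] := pv_wks_nil_of_not_grp ts f g (by rw [hgr]; simp)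
      refine congrArg (fun x => [(f, x)]) ?_
      rw [pvInner, pvGrps, List.filter_append, pv_grps_nil_of_not_farm ts f hf, List.nil_append]
      have hft : List.filter (fun s => s.1 == f) [(f, g, w)] = [(f, g, w)] := by simp
      rw [hft, List.map_cons, List.map_nil]
      have hgs : PySem.Set.ofList [g] = [g] := rfl
      rw [hgs, List.map_cons, List.map_nil, pv_wks_append_self, hwk, List.nil_append]

theorem pv_canb (ts : List (String × String × String)) :
    ts.foldl pvStep2 PySem.Dict.empty = pvCanon ts := by
  induction ts using List.reverseRecOn with
  | nil => rfl
  | append_singleton ts t ih => rw [List.foldl_append, List.foldl_cons, List.foldl_nil, ih, pv_step2_canon]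

theorem pv_contains_mk_map {β : Type} (ks : List String) (F : String → β) (x : String) :
    (PySem.Dict.mk (ks.map (fun k => (k, F k)))).contains x = decide (x ∈ ks) := by
  have hk : (PySem.Dict.mk (ks.map (fun k => (k, F k)))).contains x = true ↔ x ∈ ks := by
    rw [PySem.Dict.contains_iff_mem_keys, pv_keys_mk_map]
  by_cases h : x ∈ ks
  · simp [hk.mpr h, h]
  · have hb : ¬ ((PySem.Dict.mk (ks.map (fun k => (k, F k)))).contains x = true) :=
      fun hc => h (hk.mp hc)
    simp only [Bool.not_eq_true] at hb
    simp [hb, h]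

theorem pv_skelInner_append_ne (ts : List (String × String × String)) (t : String × String × String)
    (i : String) (hi : i ≠ t.1) : pvSkelInner (ts ++ [t]) i = pvSkelInner ts i := by
  rw [pvSkelInner, pvSkelInner, pv_grps_append_ne ts t i hi]

theorem pv_step1_skel (ts : List (String × String × String)) (t : String × String × String)
    (hgf1 : t.2.1 ∉ pvFarms ts) (hgf2 : t.2.1 ≠ t.1) :
    pvStep1 (pvSkel ts) t = pvSkel (ts ++ [t]) := by
  obtain ⟨f, g, w⟩ := t
  simp only at hgf1 hgf2
  simp only [pvStep1, pvSkel]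
  rw [pv_contains_mk_map (pvFarms ts) (pvSkelInner ts) f]
  rw [pv_farms_append]
  by_cases hf : f ∈ pvFarms ts
  · rw [PySem.Set.add_of_mem (s := pvFarms ts) hf]
    simp only [hf, decide_true, if_true]
    rw [pv_contains_mk_map (pvFarms ts) (pvSkelInner ts) g]
    simp only [hgf1, decide_false, Bool.false_eq_true, if_false]
    rw [pv_get?_mk_map (pvFarms ts) (pvSkelInner ts) (pv_nodup_farms ts) f, if_pos hf]
    simp only [Option.getD_some]
    by_cases hg : g ∈ pvGrps ts f
    · rw [pvSkelInner, pv_insert_mk_map (pvGrps ts f) (fun _ => []) g hg _]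
      rw [pv_insert_mk_map (pvFarms ts) (pvSkelInner ts) f hf _]
      refine congrArg PySem.Dict.mk (List.map_congr_left (fun i hi => ?_))
      by_cases hif : i = f
      · subst hif
        rw [if_pos rfl, pvSkelInner, pv_grps_append_self,
            PySem.Set.add_of_mem (s := pvGrps ts i) hg]
        congr 1
        congr 1
        exact List.map_congr_left (fun j _ => by rw [ite_self])
      · rw [if_neg hif, pv_skelInner_append_ne ts (f, g, w) i hif]
    · rw [pvSkelInner, pv_insert_mk_map_not_mem (pvGrps ts f) (fun _ => []) g hg _]
      rw [pv_insert_mk_map (pvFarms ts) (pvSkelInner ts) f hf _]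
      refine congrArg PySem.Dict.mk (List.map_congr_left (fun i hi => ?_))
      by_cases hif : i = f
      · subst hif
        rw [if_pos rfl, pvSkelInner, pv_grps_append_self,
            PySem.Set.add_of_not_mem (s := pvGrps ts i) hg, List.map_append]
        congr 1
      · rw [if_neg hif, pv_skelInner_append_ne ts (f, g, w) i hif]
  · rw [PySem.Set.add_of_not_mem (s := pvFarms ts) hf]
    simp only [hf, decide_false, Bool.false_eq_true, if_false]
    have hnd' : (pvFarms ts ++ [f]).Nodup := by
      simp only [List.nodup_append, List.nodup_singleton, List.mem_singleton]
      exact ⟨pv_nodup_farms ts, trivial, fun a ha b hb => fun hab => hf ((hab.trans hb) ▸ ha)⟩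
    have hshape : (PySem.Dict.mk ((pvFarms ts).map (fun i => (i, pvSkelInner ts i)))).insert f
        PySem.Dict.empty =
        PySem.Dict.mk ((pvFarms ts ++ [f]).map
          (fun i => (i, if i = f then PySem.Dict.empty else pvSkelInner ts i))) := by
      rw [pv_insert_mk_map_not_mem (pvFarms ts) (pvSkelInner ts) f hf _, List.map_append]
      refine congrArg PySem.Dict.mk (congrArg₂ (· ++ ·)
        (List.map_congr_left (fun i hi => ?_)) (by simp))
      rw [if_neg (fun hif => hf ((show i = f from hif) ▸ hi))]
    rw [hshape]
    rw [pv_contains_mk_map (pvFarms ts ++ [f]) _ g]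
    have hgm : g ∉ pvFarms ts ++ [f] := by
      intro hm
      rcases List.mem_append.mp hm with h | h
      · exact hgf1 h
      · exact hgf2 (List.mem_singleton.mp h)
    simp only [hgm, decide_false, Bool.false_eq_true, if_false]
    rw [pv_get?_mk_map (pvFarms ts ++ [f]) _ hnd' f,
        if_pos (List.mem_append.mpr (Or.inr (List.mem_singleton.mpr rfl))), if_pos rfl]
    simp only [Option.getD_some]
    have he : (PySem.Dict.empty : PySem.Dict String (List String)).insert g [] =
        PySem.Dict.mk [(g, [])] := rfl
    rw [he, pv_insert_mk_map (pvFarms ts ++ [f]) _ f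
        (List.mem_append.mpr (Or.inr (List.mem_singleton.mpr rfl))) _]
    refine congrArg PySem.Dict.mk (List.map_congr_left (fun i hi => ?_))
    by_cases hif : i = f
    · subst hif
      rw [if_pos rfl, pvSkelInner, pvGrps, List.filter_append,
          pv_grps_nil_of_not_farm ts i hf, List.nil_append]
      have hft : List.filter (fun s => s.1 == i) [(i, g, w)] = [(i, g, w)] := by simp
      rw [hft, List.map_cons, List.map_nil]
      rfl
    · rw [if_neg hif, if_neg hif, pv_skelInner_append_ne ts (f, g, w) i hif]

theorem pv_skel (ts : List (String × String × String))
    (H : ∀ t1 ∈ ts, ∀ t2 ∈ ts, t1.2.1 ≠ t2.1) :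
    ts.foldl pvStep1 PySem.Dict.empty = pvSkel ts := by
  induction ts using List.reverseRecOn with
  | nil => rfl
  | append_singleton ts t ih =>
    have hsub : ∀ t1 ∈ ts, ∀ t2 ∈ ts, t1.2.1 ≠ t2.1 := fun t1 h1 t2 h2 =>
      H t1 (List.mem_append.mpr (Or.inl h1)) t2 (List.mem_append.mpr (Or.inl h2))
    have hmem : t ∈ ts ++ [t] := List.mem_append.mpr (Or.inr (List.mem_singleton.mpr rfl))
    have hgf1 : t.2.1 ∉ pvFarms ts := by
      intro hm
      rcases List.mem_map.mp ((PySem.Set.mem_ofList _ _).mp hm) with ⟨s, hs, hseq⟩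
      exact H t hmem s (List.mem_append.mpr (Or.inl hs)) hseq.symm
    have hgf2 : t.2.1 ≠ t.1 := H t hmem t hmem
    rw [List.foldl_append, List.foldl_cons, List.foldl_nil, ih hsub, pv_step1_skel ts t hgf1 hgf2]

theorem pv_wks_cons_self (us : List (String × String × String)) (u : String × String × String) :
    pvWks (u :: us) u.1 u.2.1 = u.2.2 :: pvWks us u.1 u.2.1 := by
  rw [pvWks, pvWks, List.filter_cons]
  simp

theorem pv_wks_cons_ne (us : List (String × String × String)) (u : String × String × String)
    (f g : String) (h : ¬(u.1 = f ∧ u.2.1 = g)) : pvWks (u :: us) f g = pvWks us f g := by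
  rw [pvWks, pvWks, List.filter_cons]
  have : (u.1 == f && u.2.1 == g) = false := by
    rcases Decidable.not_and_iff_not_or_not.mp h with h1 | h1 <;> simp [h1]
  rw [this]
  simp

theorem pv_master (us : List (String × String × String)) :
    ∀ (Y : PySem.Dict String (PySem.Dict String (List String))),
      Y.keys.Nodup →
      (∀ p ∈ Y.items, (Prod.snd p).keys.Nodup) →
      (∀ t ∈ us, ∃ d, Y.get? t.1 = some d ∧ ∃ l, d.get? t.2.1 = some l) →
      us.foldl pvStep2 Y =
        PySem.Dict.mk (Y.items.map (fun p =>
          (p.1, PySem.Dict.mk (p.2.items.map (fun q => (q.1, q.2 ++ pvWks us p.1 q.1)))))) := by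
  induction us with
  | nil =>
    intro Y _ _ _
    simp [pvWks]
  | cons u us ih =>
    intro Y hnd hinner hcont
    obtain ⟨f, g, w⟩ := u
    obtain ⟨d, hd, l, hl⟩ := hcont (f, g, w) (List.mem_cons_self)
    have hcf : Y.contains f = true := by rw [PySem.Dict.contains_eq_isSome_get?, hd]; rfl
    have hdg : d.contains g = true := by rw [PySem.Dict.contains_eq_isSome_get?, hl]; rfl
    have hmemY : (f, d) ∈ Y.items := PySem.Dict.mem_items_of_get?_eq_some Y hd
    have hstep : pvStep2 Y (f, g, w) = Y.insert f (d.insert g (l ++ [w])) := by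
      simp only [pvStep2]
      rw [hd, Option.getD_some, hl, Option.getD_some]
    have hY'items : (Y.insert f (d.insert g (l ++ [w]))).items =
        Y.items.map (fun p => if p.1 == f then (f, d.insert g (l ++ [w])) else p) :=
      PySem.Dict.items_insert_of_contains _ _ hcf
    rw [List.foldl_cons, hstep,
        ih _ (by rw [PySem.Dict.keys_insert_of_contains _ _ hcf]; exact hnd)
          (by
            intro p hp
            rw [hY'items] at hp
            rcases List.mem_map.mp hp with ⟨p0, hp0, rfl⟩
            by_cases hb : p0.1 == f
            · rw [if_pos hb]
              exact PySem.Dict.nodup_keys_insert _ _ _ (hinner (f, d) hmemY)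
            · rw [if_neg hb]
              exact hinner p0 hp0)
          (by
            intro t ht
            rcases hcont t (List.mem_cons_of_mem _ ht) with ⟨dt, hdt, lt, hlt⟩
            by_cases h1 : t.1 = f
            · have hdtd : dt = d := by
                rw [h1, hd] at hdt
                exact (Option.some_inj.mp hdt).symm
              refine ⟨d.insert g (l ++ [w]), by rw [h1]; exact PySem.Dict.get?_insert_self _ _ _, ?_⟩
              by_cases h2 : t.2.1 = g
              · exact ⟨l ++ [w], by rw [h2]; exact PySem.Dict.get?_insert_self _ _ _⟩
              · exact ⟨lt, by rw [PySem.Dict.get?_insert_of_ne _ _ h2, ← hdtd]; exact hlt⟩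
            · exact ⟨dt, by rw [PySem.Dict.get?_insert_of_ne _ _ h1]; exact hdt, lt, hlt⟩)]
    refine congrArg PySem.Dict.mk ?_
    rw [hY'items, List.map_map]
    refine List.map_congr_left (fun p hp => ?_)
    obtain ⟨p1, p2⟩ := p
    by_cases hp1 : p1 = f
    · subst hp1
      have hp2d : p2 = d := by
        have := PySem.Dict.get?_of_mem_items Y hp hnd
        rw [hd] at this
        exact (Option.some_inj.mp this).symm
      subst hp2d
      simp only [Function.comp_apply, beq_self_eq_true, if_pos]
      refine congrArg (fun x => (p1, PySem.Dict.mk x)) ?_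
      rw [PySem.Dict.items_insert_of_contains _ _ hdg, List.map_map]
      refine List.map_congr_left (fun q hq => ?_)
      obtain ⟨q1, q2⟩ := q
      by_cases hq1 : q1 = g
      · subst hq1
        have hq2l : q2 = l := by
          have := PySem.Dict.get?_of_mem_items p2 hq (hinner (p1, p2) hp)
          rw [hl] at this
          exact (Option.some_inj.mp this).symm
        subst hq2l
        simp only [Function.comp_apply, beq_self_eq_true, if_pos]
        rw [pv_wks_cons_self us (p1, q1, w)]
        simp
      · have hb : (q1 == g) = false := beq_eq_false_iff_ne.mpr hq1
        simp only [Function.comp_apply, hb, Bool.false_eq_true, if_false]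
        rw [pv_wks_cons_ne us (p1, g, w) p1 q1 (fun hc => hq1 hc.2.symm)]
    · have hb : (p1 == f) = false := beq_eq_false_iff_ne.mpr hp1
      simp only [Function.comp_apply, hb, Bool.false_eq_true, if_false]
      refine congrArg (fun x => (p1, PySem.Dict.mk x)) ?_
      refine List.map_congr_left (fun q hq => ?_)
      rw [pv_wks_cons_ne us (f, g, w) p1 q.1 (fun hc => hp1 hc.1.symm)]

theorem pv_main (ts : List (String × String × String))
    (H : ∀ t1 ∈ ts, ∀ t2 ∈ ts, t1.2.1 ≠ t2.1) :
    ts.foldl pvStep2 (ts.foldl pvStep1 PySem.Dict.empty) = ts.foldl pvStep2 PySem.Dict.empty := by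
  rw [pv_skel ts H, pv_canb ts, pvSkel,
      pv_master ts _
        (by rw [pv_keys_mk_map]; exact pv_nodup_farms ts)
        (by
          intro p hp
          rcases List.mem_map.mp hp with ⟨i, _, rfl⟩
          rw [pvSkelInner, pv_keys_mk_map]
          exact pv_nodup_grps ts i)
        (by
          intro t ht
          refine ⟨pvSkelInner ts t.1, ?_, [], ?_⟩
          · rw [pv_get?_mk_map (pvFarms ts) (pvSkelInner ts) (pv_nodup_farms ts) t.1,
                if_pos (pv_mem_farms ht)]
          · rw [pvSkelInner, pv_get?_mk_map (pvGrps ts t.1) (fun _ => []) (pv_nodup_grps ts t.1) t.2.1,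
                if_pos (pv_mem_grps ht)])]
  rw [pvCanon]
  refine congrArg PySem.Dict.mk ?_
  rw [List.map_map]
  refine List.map_congr_left (fun i _ => ?_)
  simp only [Function.comp_apply, pvSkelInner, pvInner]
  refine congrArg (fun x => (i, PySem.Dict.mk x)) ?_
  rw [List.map_map]
  refine List.map_congr_left (fun j _ => ?_)
  simp

theorem pv_A_eq (data : List (String × List (String × List (String × String))))
    (hnd : (data.map Prod.fst).Nodup) :
    workersDetail_to_StruDetail data =
      ((pvTri data).foldl pvStep2 ((pvTri data).foldl pvStep1 PySem.Dict.empty)).items.map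
        (fun p => (p.1, p.2.items)) := by
  have hlu : ∀ p ∈ data, ((PySem.Dict.mk data).get? p.1).getD [] = p.2 := by
    intro p hp
    have hm : (p.1, p.2) ∈ (PySem.Dict.mk data).items := by simpa using hp
    have hk : (PySem.Dict.mk data).keys.Nodup := hnd
    rw [PySem.Dict.get?_of_mem_items (PySem.Dict.mk data) hm hk, Option.getD_some]
  simp only [workersDetail_to_StruDetail, pvTri, List.foldl_flatMap, List.foldl_map,
    List.foldl_filter]
  have key : ∀ (G : PySem.Dict String (PySem.Dict String (List String)) →
      (String × List (String × String)) → PySem.Dict String (PySem.Dict String (List String)))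
      (init : PySem.Dict String (PySem.Dict String (List String))),
      List.foldl (fun st p => List.foldl G st (((PySem.Dict.mk data).get? p.1).getD [])) init data
        = List.foldl (fun st p => List.foldl G st p.2) init data := by
    intro G init
    apply List.foldl_ext
    intro st p hp
    rw [hlu p hp]
  rw [key, key]
  refine congrArg (fun z : PySem.Dict String (PySem.Dict String (List String)) => z.items.map (fun p => (p.1, p.2.items))) ?_
  congr 1

theorem pv_B_eq (data : List (String × List (String × List (String × String)))) :
    workersDetail_to_StruDetail_alt data =
      ((pvTri data).foldl pvStep2 PySem.Dict.empty).items.map (fun p => (p.1, p.2.items)) := rfl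

-- ===== VERDICT (by name: the statement is the Claim_ definition above) =====
theorem workersDetail_to_StruDetail_spec : Claim_equal_workersDetail_to_StruDetail := by
  intro data _hdom hpre
  rcases hpre with ⟨hnd, _hkeys, hgf⟩
  show workersDetail_to_StruDetail data = workersDetail_to_StruDetail_alt data
  have H : ∀ t1 ∈ pvTri data, ∀ t2 ∈ pvTri data, t1.2.1 ≠ t2.1 := by
    intro t1 ht1 t2 ht2
    rcases List.mem_flatMap.mp ht1 with ⟨p1, hp1, hm1⟩
    rcases List.mem_map.mp hm1 with ⟨q1, hq1, rfl⟩
    rcases List.mem_flatMap.mp ht2 with ⟨p2, hp2, hm2⟩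
    rcases List.mem_map.mp hm2 with ⟨q2, hq2, rfl⟩
    have hd1 : q1.2 ∈ pvMinerDetails data :=
      List.mem_flatMap.mpr ⟨p1, hp1, List.mem_map.mpr ⟨q1, hq1, rfl⟩⟩
    have hd2 : q2.2 ∈ pvMinerDetails data :=
      List.mem_flatMap.mpr ⟨p2, hp2, List.mem_map.mpr ⟨q2, hq2, rfl⟩⟩
    exact hgf q1.2 hd1 q2.2 hd2
  rw [pv_A_eq data hnd, pv_B_eq data, pv_main (pvTri data) H]
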